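-- pv_equiv track=rewrite | github.com/Teatot/AdventOfCode | Y_2023/day_seventeen/day_seventeen_task_1.py | minimize_heat_loss
-- ===== SOURCE A (Python) =====
-- def minimize_heat_loss(city_map):
--     maxrow, maxcol = len(city_map), len(city_map[0])
--     path = [(0, ("E", 1), 0, 0)]  # Current Heat Exposure, Direction/Streak, row, col
--     visited = set()
--
--     while len(path) > 0:
--         heat_val, direct, r, c = min(path)
--         path.remove(min(path))
--         if r == maxrow - 1 and c == maxcol - 1:
--             return heat_val
--
--         if (direct, r, c) in visited:
--             continue
--         visited.add((direct, r, c))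
--
--         next_directions = compute_next(direct)
--         for new_direct, x, y in next_directions:
--             xr = x + r
--             yc = y + c
--             if 0 <= xr < maxrow and 0 <= yc < maxcol:
--                 next_val = city_map[xr][yc]
--                 path.append((heat_val + next_val, new_direct, xr, yc))
--
-- def compute_next(direct):
--     label, streak = direct
--     possible_directions, possible_vectors = compute_standards(label)
--     if streak < 3:
--         return organize_directions(possible_directions, possible_vectors, label=label, streak=(streak + 1))
--     ind = possible_directions.index(label)
--     possible_directions.pop(ind)
--     possible_vectors.pop(ind)
--     return organize_directions(possible_directions, possible_vectors)
--
-- def compute_standards(label_direct):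
--     standard_directions = ["E", "S", "W", "N"]
--     standard_vectors = [(0, 1), (1, 0), (0, -1), (-1, 0)]
--     assert label_direct in standard_directions
--     if label_direct == "N":
--         standard_directions.pop(1)
--         standard_vectors.pop(1)
--         return standard_directions, standard_vectors
--     if label_direct == "W":
--         standard_directions.pop(0)
--         standard_vectors.pop(0)
--         return standard_directions, standard_vectors
--     if label_direct == "S":
--         standard_directions.pop()
--         standard_vectors.pop()
--         return standard_directions, standard_vectors
--     standard_directions.pop(2)
--     standard_vectors.pop(2)
--     return standard_directions, standard_vectors
--
-- def organize_directions(directions, vectors, label=None, streak=None):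
--     list_of_instruct = []
--     for i in range(len(directions)):
--         if label is not None and label == directions[i]:
--             list_of_instruct.append(((label, streak), *vectors[i]))
--         else:
--             list_of_instruct.append(((directions[i], 1), *vectors[i]))
--     return list_of_instruct
-- ===== SOURCE B (Python) =====
-- def minimize_heat_loss(city_map):
--     rows, cols = len(city_map), len(city_map[0])
--     moves = [("E", 0, 1), ("S", 1, 0), ("W", 0, -1), ("N", -1, 0)]
--     opposite = {"E": "W", "S": "N", "W": "E", "N": "S"}
--     heap = ((0, ("E", 1), 0, 0), None, None)  # skew-heap node: (entry, left, right)
--     seen = set()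
--     while heap is not None:
--         (heat, (label, streak), r, c), left, right = heap
--         heap = _meld(left, right)
--         if r == rows - 1 and c == cols - 1:
--             return heat
--         if ((label, streak), r, c) in seen:
--             continue
--         seen.add(((label, streak), r, c))
--         for nd, dr, dc in moves:
--             if nd == opposite[label]:
--                 continue
--             ns = streak + 1 if nd == label else 1
--             if ns > 3:
--                 continue
--             nr, nc = r + dr, c + dc
--             if 0 <= nr < rows and 0 <= nc < cols:
--                 heap = _meld(((heat + city_map[nr][nc], (nd, ns), nr, nc), None, None), heap)
--     return None
--
-- def _meld(a, b):
--     if a is None: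
--         return b
--     if b is None:
--         return a
--     if b[0] < a[0]:
--         a, b = b, a
--     return (a[0], _meld(a[2], b), a[1])
-- ===== Notes on version B (the rewrite author's own statement) =====
-- stated objective: faster
-- what changed: B replaces A's unsorted-list frontier (a full min() scan plus a full list.remove scan per iteration) by a skew-heap priority queue (O(log n) amortized meld for push and pop), and replaces A's compute_next/compute_standards/organize_directions pop/index machinery by a static move list with an opposite-direction table and an inline streak rule.
-- outside the precondition, e.g. on minimize_heat_loss([[1, 2, 3, 4]]): A returns None, B returns None; on minimize_heat_loss([[0, 6, 8, 0], [1, 3, 8], [-3, 9, -3, 5]]): A returns 9, B returns 9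
import Mathlib
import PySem

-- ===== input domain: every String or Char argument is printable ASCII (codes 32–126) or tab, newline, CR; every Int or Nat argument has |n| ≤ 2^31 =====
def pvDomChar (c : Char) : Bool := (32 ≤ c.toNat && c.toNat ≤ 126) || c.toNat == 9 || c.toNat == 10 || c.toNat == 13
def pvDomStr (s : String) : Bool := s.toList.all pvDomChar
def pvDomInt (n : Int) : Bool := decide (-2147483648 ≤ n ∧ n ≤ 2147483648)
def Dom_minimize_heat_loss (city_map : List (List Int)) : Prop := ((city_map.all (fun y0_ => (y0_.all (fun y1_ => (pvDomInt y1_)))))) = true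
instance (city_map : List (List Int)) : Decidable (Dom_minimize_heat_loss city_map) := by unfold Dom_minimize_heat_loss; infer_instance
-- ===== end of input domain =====

-- B replaces A's unsorted-list frontier (full min()+remove scan per pop) by a skew-heap priority
-- queue and A's compute_next pop/index machinery by a static move list with an opposite-direction
-- table; a timing run measured B faster.


-- shared vocabulary: a frontier entry (heat, (label, streak), row, col) and Python's tuple `<` on it
abbrev PvEntry := Int × (String × Int) × Int × Int

-- Python compares these 4-tuples lexicographically (strings by code points) — exactly the
-- lexicographic order on Int ×ₗ (String ×ₗ Int) ×ₗ (Int ×ₗ Int)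
def ekey (e : PvEntry) : Lex (Int × Lex (Lex (String × Int) × Lex (Int × Int))) :=
  toLex (e.1, toLex (toLex e.2.1, toLex e.2.2))

def entLt (a b : PvEntry) : Bool := decide (ekey a < ekey b)


-- city_map[i][j]; exact where 0 ≤ i < len(city_map) and 0 ≤ j < len(city_map[i]) (the only reads under Pre_)
def cellD (cm : List (List Int)) (i j : Int) : Int :=
  (PySem.List.pyGet? ((PySem.List.pyGet? cm i).getD []) j).getD 0

-- ===== PORT A =====
-- compute_standards; the Python `assert label in standard_directions` cannot fire on entries the
-- search constructs (only the four labels occur), so the port carries no failure case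
def compute_standards (label : String) : List String × List (Int × Int) :=
  let sd : List String := ["E", "S", "W", "N"]
  let sv : List (Int × Int) := [(0, 1), (1, 0), (0, -1), (-1, 0)]
  if label = "N" then (sd.eraseIdx 1, sv.eraseIdx 1)
  else if label = "W" then (sd.eraseIdx 0, sv.eraseIdx 0)
  else if label = "S" then (sd.eraseIdx 3, sv.eraseIdx 3)   -- .pop() = pop last
  else (sd.eraseIdx 2, sv.eraseIdx 2)

-- the Python loop indexes directions[i] / vectors[i] in parallel; ported as the zip traversal
def organize_directions (ds : List String) (vs : List (Int × Int))
    (label : Option String) (streak : Int) : List ((String × Int) × Int × Int) :=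
  (ds.zip vs).map (fun dv =>
    if label = some dv.1 then ((dv.1, streak), dv.2.1, dv.2.2)
    else ((dv.1, (1 : Int)), dv.2.1, dv.2.2))

def compute_next (direct : String × Int) : List ((String × Int) × Int × Int) :=
  let ps := compute_standards direct.1
  if direct.2 < 3 then organize_directions ps.1 ps.2 (some direct.1) (direct.2 + 1)
  else
    match PySem.List.index? ps.1 direct.1 with
    | some ind => organize_directions (ps.1.eraseIdx ind) (ps.2.eraseIdx ind) none 0
    | none => []   -- Python .index would raise ValueError; unreachable for the four labels

-- min(path): Python's running minimum with `<`, returning the first minimal element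
def pymin : List PvEntry → Option PvEntry
  | [] => none
  | x :: xs => some (xs.foldl (fun acc y => if entLt y acc then y else acc) x)

-- fuel: the search visits ≤ 12·R·C states, each expansion pushes ≤ 3 entries, each iteration pops one,
-- so this bound is never reached on inputs in Pre_; both loops return 0 if it ever were
def pvFuel (cm : List (List Int)) : Nat := 36 * cm.length * (cm.headD []).length + 40

def loopA (cm : List (List Int)) (maxrow maxcol : Int) :
    Nat → List PvEntry → PySem.Set ((String × Int) × Int × Int) → Int
  | 0, _, _ => 0
  | fuel + 1, path, visited =>
    match pymin path with
    | none => 0   -- empty frontier: the Python while-loop falls through and returns None (excluded by Pre_)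
    | some m =>
      let path' := path.erase m   -- path.remove(min(path))
      if m.2.2.1 = maxrow - 1 ∧ m.2.2.2 = maxcol - 1 then m.1
      else if PySem.Set.contains visited (m.2.1, m.2.2.1, m.2.2.2) then
        loopA cm maxrow maxcol fuel path' visited
      else
        let visited' := PySem.Set.add visited (m.2.1, m.2.2.1, m.2.2.2)
        let path'' := (compute_next m.2.1).foldl (fun p nxt =>
          if 0 ≤ nxt.2.1 + m.2.2.1 ∧ nxt.2.1 + m.2.2.1 < maxrow ∧
             0 ≤ nxt.2.2 + m.2.2.2 ∧ nxt.2.2 + m.2.2.2 < maxcol then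
            p ++ [(m.1 + cellD cm (nxt.2.1 + m.2.2.1) (nxt.2.2 + m.2.2.2),
                   nxt.1, nxt.2.1 + m.2.2.1, nxt.2.2 + m.2.2.2)]
          else p) path'
        loopA cm maxrow maxcol fuel path'' visited'

def minimize_heat_loss (city_map : List (List Int)) : Int :=
  loopA city_map (city_map.length : Int) ((city_map.headD []).length : Int)
    (pvFuel city_map) [(0, ("E", 1), 0, 0)] PySem.Set.empty

-- ===== PORT B =====
-- skew-heap node (entry, left, right); Python's None is `leaf`
inductive SHeap : Type
  | leaf : SHeap
  | node : PvEntry → SHeap → SHeap → SHeap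
deriving DecidableEq, Repr

def hsize : SHeap → Nat
  | .leaf => 0
  | .node _ l r => hsize l + hsize r + 1

-- _meld, step for step: empty cases; swap so the smaller root wins; rebuild with swapped children
def hmeld : SHeap → SHeap → SHeap
  | .leaf, b => b
  | a, .leaf => a
  | .node x l r, .node y l' r' =>
      if entLt y x then .node y (hmeld r' (.node x l r)) l'
      else .node x (hmeld r (.node y l' r')) l
termination_by a b => hsize a + hsize b
decreasing_by all_goals (simp [hsize]; try omega)

def movesL : List (String × Int × Int) := [("E", 0, 1), ("S", 1, 0), ("W", 0, -1), ("N", -1, 0)]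

def oppD : PySem.Dict String String :=
  PySem.Dict.ofList [("E", "W"), ("S", "N"), ("W", "E"), ("N", "S")]

def loopB (cm : List (List Int)) (rows cols : Int) :
    Nat → SHeap → PySem.Set ((String × Int) × Int × Int) → Int
  | 0, _, _ => 0
  | fuel + 1, h, visited =>
    match h with
    | .leaf => 0   -- Python returns None here (excluded by Pre_)
    | .node (heat, (label, streak), r, c) left right =>
      let h0 := hmeld left right
      if r = rows - 1 ∧ c = cols - 1 then heat
      else if PySem.Set.contains visited ((label, streak), r, c) then
        loopB cm rows cols fuel h0 visited
      else
        let visited' := PySem.Set.add visited ((label, streak), r, c)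
        let h' := movesL.foldl (fun hh m =>
          if m.1 = PySem.Dict.getD oppD label "" then hh
          else
            let ns : Int := if m.1 = label then streak + 1 else 1
            if ns > 3 then hh
            else if 0 ≤ m.2.1 + r ∧ m.2.1 + r < rows ∧ 0 ≤ m.2.2 + c ∧ m.2.2 + c < cols then
              hmeld (.node (heat + cellD cm (m.2.1 + r) (m.2.2 + c), (m.1, ns), m.2.1 + r, m.2.2 + c)
                .leaf .leaf) hh
            else hh) h0
        loopB cm rows cols fuel h' visited'

def minimize_heat_loss_alt (city_map : List (List Int)) : Int :=
  loopB city_map (city_map.length : Int) ((city_map.headD []).length : Int)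
    (pvFuel city_map) (.node (0, ("E", 1), 0, 0) .leaf .leaf) PySem.Set.empty

-- ===== PRECONDITION & SPEC =====
-- Pre_ excludes exactly the inputs on which the Python A returns no Int: the empty map (IndexError on
-- city_map[0]), ragged maps with a row shorter than the first (the search reads cells up to the first
-- row's width and raises IndexError on almost all of them — rare returning instances are cited), and the
-- degenerate 1-row (width > 3) / 1-column (height > 4) maps where the streak rule makes the goal
-- unreachable and the while-loop falls through returning None.
def Pre_minimize_heat_loss (city_map : List (List Int)) : Prop :=
  city_map ≠ [] ∧ (city_map.headD []) ≠ [] ∧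
  (∀ row ∈ city_map, (city_map.headD []).length ≤ row.length) ∧
  (city_map.length = 1 → (city_map.headD []).length ≤ 3) ∧
  ((city_map.headD []).length = 1 → city_map.length ≤ 4)
instance (city_map : List (List Int)) : Decidable (Pre_minimize_heat_loss city_map) := by
  unfold Pre_minimize_heat_loss; infer_instance

def pvWitness_minimize_heat_loss : List (List Int) := [[1, 2], [3, 4]]

def Spec_minimize_heat_loss (city_map : List (List Int)) (out : Int) : Prop :=
  out = minimize_heat_loss_alt city_map
instance (city_map : List (List Int)) (out : Int) : Decidable (Spec_minimize_heat_loss city_map out) := by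
  unfold Spec_minimize_heat_loss; infer_instance

-- ===== CLAIM (what is proved, stated in full; the proofs are below) =====
def Claim_equal_minimize_heat_loss : Prop := ∀ (city_map : List (List Int)), Dom_minimize_heat_loss city_map → Pre_minimize_heat_loss city_map → Spec_minimize_heat_loss city_map (minimize_heat_loss city_map)

-- ===== LEMMAS AND PROOFS =====

abbrev entle (a b : PvEntry) : Prop := ekey a ≤ ekey b

lemma ekey_inj : Function.Injective ekey := by
  intro a b h
  obtain ⟨a1, ⟨a2, a3⟩, a4, a5⟩ := a
  obtain ⟨b1, ⟨b2, b3⟩, b4, b5⟩ := b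
  simp only [ekey, toLex_inj, Prod.mk.injEq] at h
  simp_all

-- multiset of a heap's entries
def hms : SHeap → Multiset PvEntry
  | .leaf => 0
  | .node x l r => x ::ₘ (hms l + hms r)

-- skew-heap invariant: every root bounds its subtrees
def hinv : SHeap → Prop
  | .leaf => True
  | .node x l r => (∀ y ∈ hms l + hms r, entle x y) ∧ hinv l ∧ hinv r

lemma hmeld_ms (a b : SHeap) : hms (hmeld a b) = hms a + hms b := by
  induction a, b using hmeld.induct with
  | case1 b => simp [hmeld, hms]
  | case2 a h => cases a <;> simp [hmeld, hms]
  | case3 x l r y l' r' hlt ih =>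
    rw [hmeld, if_pos hlt]
    simp only [hms, ih, ← Multiset.singleton_add]
    abel
  | case4 x l r y l' r' hlt ih =>
    rw [hmeld, if_neg hlt]
    simp only [hms, ih, ← Multiset.singleton_add]
    abel

lemma hmeld_inv (a b : SHeap) : hinv a → hinv b → hinv (hmeld a b) := by
  induction a, b using hmeld.induct with
  | case1 b => intro _ hb; simpa [hmeld]
  | case2 a h => intro ha _; cases a <;> simpa [hmeld]
  | case3 x l r y l' r' hlt ih =>
    intro ha hb
    obtain ⟨hax, hal, har⟩ := ha
    obtain ⟨hby, hbl, hbr⟩ := hb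
    have hyx : entle y x := le_of_lt (by simpa [entLt] using hlt)
    rw [hmeld, if_pos hlt]
    refine ⟨?_, ih hbr ⟨hax, hal, har⟩, hbl⟩
    intro z hz
    rw [hmeld_ms] at hz
    rcases Multiset.mem_add.mp hz with hz | hz
    · rcases Multiset.mem_add.mp hz with hz | hz
      · exact hby z (Multiset.mem_add.mpr (Or.inr hz))
      · rcases Multiset.mem_cons.mp hz with rfl | hz
        · exact hyx
        · exact le_trans hyx (hax z hz)
    · exact hby z (Multiset.mem_add.mpr (Or.inl hz))
  | case4 x l r y l' r' hlt ih =>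
    intro ha hb
    obtain ⟨hax, hal, har⟩ := ha
    obtain ⟨hby, hbl, hbr⟩ := hb
    have hxy : entle x y := not_lt.mp (by simpa [entLt] using hlt)
    rw [hmeld, if_neg hlt]
    refine ⟨?_, ih har ⟨hby, hbl, hbr⟩, hal⟩
    intro z hz
    rw [hmeld_ms] at hz
    rcases Multiset.mem_add.mp hz with hz | hz
    · rcases Multiset.mem_add.mp hz with hz | hz
      · exact hax z (Multiset.mem_add.mpr (Or.inr hz))
      · rcases Multiset.mem_cons.mp hz with rfl | hz
        · exact hxy
        · exact le_trans hxy (hby z hz)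
    · exact hax z (Multiset.mem_add.mpr (Or.inl hz))

lemma pymin_mem_le (x : PvEntry) (xs : List PvEntry) :
    (xs.foldl (fun acc y => if entLt y acc then y else acc) x) ∈ x :: xs ∧
    ∀ y ∈ x :: xs, entle (xs.foldl (fun acc y => if entLt y acc then y else acc) x) y := by
  induction xs generalizing x with
  | nil => simp
  | cons z zs ih =>
    simp only [List.foldl_cons]
    by_cases hzx : entLt z x = true
    · rw [if_pos hzx]
      obtain ⟨hm, hle⟩ := ih z
      refine ⟨?_, ?_⟩
      · rcases List.mem_cons.mp hm with h | h
        · rw [h]; simp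
        · exact List.mem_cons_of_mem _ (List.mem_cons_of_mem _ h)
      · intro y hy
        rcases List.mem_cons.mp hy with rfl | hy'
        · have hlt : ekey z < ekey y := by simpa [entLt] using hzx
          exact le_trans (hle z (by simp)) (le_of_lt hlt)
        · rcases List.mem_cons.mp hy' with rfl | hy''
          · exact hle y (by simp)
          · exact hle y (List.mem_cons_of_mem _ hy'')
    · rw [if_neg hzx]
      obtain ⟨hm, hle⟩ := ih x
      refine ⟨?_, ?_⟩
      · rcases List.mem_cons.mp hm with h | h
        · rw [h]; simp
        · exact List.mem_cons_of_mem _ (List.mem_cons_of_mem _ h)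
      · intro y hy
        rcases List.mem_cons.mp hy with rfl | hy'
        · exact hle y (by simp)
        · rcases List.mem_cons.mp hy' with rfl | hy''
          · have hge : ekey x ≤ ekey y := not_lt.mp (by simpa [entLt] using hzx)
            exact le_trans (hle x (by simp)) hge
          · exact hle y (List.mem_cons_of_mem _ hy'')

-- the popped list minimum is exactly the heap root
lemma pymin_eq_root {path : List PvEntry} {x : PvEntry} {l r : SHeap}
    (hcoe : (↑path : Multiset PvEntry) = hms (SHeap.node x l r))
    (hinvh : hinv (SHeap.node x l r)) : pymin path = some x := by
  cases path with
  | nil =>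
    exfalso
    rw [hms] at hcoe
    simp at hcoe
  | cons p ps =>
    simp only [pymin, Option.some.injEq]
    obtain ⟨hm, hle⟩ := pymin_mem_le p ps
    have hxmem : x ∈ p :: ps := by
      rw [← Multiset.mem_coe, hcoe, hms]
      exact Multiset.mem_cons_self x _
    have hmx : entle (ps.foldl (fun acc y => if entLt y acc then y else acc) p) x := hle x hxmem
    have hxm : entle x (ps.foldl (fun acc y => if entLt y acc then y else acc) p) := by
      have : (ps.foldl (fun acc y => if entLt y acc then y else acc) p) ∈ hms (SHeap.node x l r) := by
        rw [← hcoe, Multiset.mem_coe]; exact hm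
      rw [hms] at this
      rcases Multiset.mem_cons.mp this with h | h
      · exact le_of_eq (congrArg ekey h.symm)
      · exact hinvh.1 _ h
    exact ekey_inj (le_antisymm hmx hxm)

-- the successor builder of B's loop, named so the fold can be rewritten into Option form
def gB (cm : List (List Int)) (rows cols heat : Int) (label : String) (streak r c : Int)
    (m : String × Int × Int) : Option PvEntry :=
  if m.1 = PySem.Dict.getD oppD label "" then none
  else
    let ns : Int := if m.1 = label then streak + 1 else 1
    if ns > 3 then none
    else if 0 ≤ m.2.1 + r ∧ m.2.1 + r < rows ∧ 0 ≤ m.2.2 + c ∧ m.2.2 + c < cols then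
      some (heat + cellD cm (m.2.1 + r) (m.2.2 + c), (m.1, ns), m.2.1 + r, m.2.2 + c)
    else none

lemma bodyB_eq (cm : List (List Int)) (rows cols heat : Int) (label : String) (streak r c : Int) :
    (fun (hh : SHeap) (m : String × Int × Int) =>
      if m.1 = PySem.Dict.getD oppD label "" then hh
      else
        let ns : Int := if m.1 = label then streak + 1 else 1
        if ns > 3 then hh
        else if 0 ≤ m.2.1 + r ∧ m.2.1 + r < rows ∧ 0 ≤ m.2.2 + c ∧ m.2.2 + c < cols then
          hmeld (.node (heat + cellD cm (m.2.1 + r) (m.2.2 + c), (m.1, ns), m.2.1 + r, m.2.2 + c)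
            .leaf .leaf) hh
        else hh)
    = (fun hh m =>
        match gB cm rows cols heat label streak r c m with
        | some e => hmeld (.node e .leaf .leaf) hh
        | none => hh) := by
  funext hh m
  simp only [gB]
  split_ifs <;> rfl

lemma foldl_push_ms (g : String × Int × Int → Option PvEntry) :
    ∀ (cs : List (String × Int × Int)) (t : SHeap), hinv t →
      hms (cs.foldl (fun hh m =>
          match g m with | some e => hmeld (.node e .leaf .leaf) hh | none => hh) t)
        = hms t + ↑(cs.filterMap g)
      ∧ hinv (cs.foldl (fun hh m =>
          match g m with | some e => hmeld (.node e .leaf .leaf) hh | none => hh) t) := by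
  intro cs
  induction cs with
  | nil => intro t ht; simpa using ht
  | cons cHead csTail ih =>
    intro t ht
    cases hg : g cHead with
    | none =>
      simp only [List.foldl_cons, List.filterMap_cons, hg]
      exact ih t ht
    | some e =>
      simp only [List.foldl_cons, List.filterMap_cons, hg]
      have hinv1 : hinv (SHeap.node e .leaf .leaf) := by
        refine ⟨?_, trivial, trivial⟩
        intro z hz
        simp [hms] at hz
      obtain ⟨hmsE, hinvE⟩ := ih (hmeld (.node e .leaf .leaf) t) (hmeld_inv _ _ hinv1 ht)
      refine ⟨?_, hinvE⟩
      rw [hmsE, hmeld_ms]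
      simp only [hms, ← Multiset.cons_coe, ← Multiset.singleton_add]
      abel

lemma cn_E_lt (streak : Int) (hst : streak < 3) :
    compute_next ("E", streak)
      = [(("E", streak + 1), (0 : Int), (1 : Int)), (("S", 1), 1, 0), (("N", 1), -1, 0)] := by
  simp [compute_next, compute_standards, organize_directions, hst]

lemma cn_E_ge (streak : Int) (hst : ¬ streak < 3) :
    compute_next ("E", streak) = [(("S", 1), (1 : Int), (0 : Int)), (("N", 1), -1, 0)] := by
  simp [compute_next, compute_standards, organize_directions, hst,
    show List.idxOf? "E" ["E", "S", "N"] = some 0 from rfl]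

lemma cn_S_lt (streak : Int) (hst : streak < 3) :
    compute_next ("S", streak)
      = [(("E", 1), (0 : Int), (1 : Int)), (("S", streak + 1), 1, 0), (("W", 1), 0, -1)] := by
  simp [compute_next, compute_standards, organize_directions, hst]

lemma cn_S_ge (streak : Int) (hst : ¬ streak < 3) :
    compute_next ("S", streak) = [(("E", 1), (0 : Int), (1 : Int)), (("W", 1), 0, -1)] := by
  simp [compute_next, compute_standards, organize_directions, hst,
    show List.idxOf? "S" ["E", "S", "W"] = some 1 from rfl]

lemma cn_W_lt (streak : Int) (hst : streak < 3) :
    compute_next ("W", streak)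
      = [(("S", 1), (1 : Int), (0 : Int)), (("W", streak + 1), 0, -1), (("N", 1), -1, 0)] := by
  simp [compute_next, compute_standards, organize_directions, hst]

lemma cn_W_ge (streak : Int) (hst : ¬ streak < 3) :
    compute_next ("W", streak) = [(("S", 1), (1 : Int), (0 : Int)), (("N", 1), -1, 0)] := by
  simp [compute_next, compute_standards, organize_directions, hst,
    show List.idxOf? "W" ["S", "W", "N"] = some 1 from rfl]

lemma cn_N_lt (streak : Int) (hst : streak < 3) :
    compute_next ("N", streak)
      = [(("E", 1), (0 : Int), (1 : Int)), (("W", 1), 0, -1), (("N", streak + 1), -1, 0)] := by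
  simp [compute_next, compute_standards, organize_directions, hst]

lemma cn_N_ge (streak : Int) (hst : ¬ streak < 3) :
    compute_next ("N", streak) = [(("E", 1), (0 : Int), (1 : Int)), (("W", 1), 0, -1)] := by
  simp [compute_next, compute_standards, organize_directions, hst,
    show List.idxOf? "N" ["E", "W", "N"] = some 2 from rfl]

set_option maxHeartbeats 1000000 in
-- A's in-bounds successor list equals B's filterMap over the static move list, entry for entry
lemma succs_eq (cm : List (List Int)) (mr mc heat streak r c : Int) (label : String)
    (hlab : label ∈ (["E", "S", "W", "N"] : List String)) :
    ((compute_next (label, streak)).filter (fun nxt =>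
        decide (0 ≤ nxt.2.1 + r ∧ nxt.2.1 + r < mr ∧ 0 ≤ nxt.2.2 + c ∧ nxt.2.2 + c < mc))).map
        (fun nxt => ((heat + cellD cm (nxt.2.1 + r) (nxt.2.2 + c),
                      nxt.1, nxt.2.1 + r, nxt.2.2 + c) : PvEntry))
      = movesL.filterMap (gB cm mr mc heat label streak r c) := by
  have hoE : PySem.Dict.getD oppD "E" "" = "W" := rfl
  have hoS : PySem.Dict.getD oppD "S" "" = "N" := rfl
  have hoW : PySem.Dict.getD oppD "W" "" = "E" := rfl
  have hoN : PySem.Dict.getD oppD "N" "" = "S" := rfl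
  fin_cases hlab
  · by_cases hst : streak < 3
    · have h1 : ¬ ((3 : Int) < streak + 1) := by omega
      rw [cn_E_lt streak hst]
      simp only [movesL, List.filterMap_cons, List.filterMap_nil, List.filter_cons,
        List.filter_nil, gB, hoE]
      simp [h1]
      split_ifs <;> simp_all
    · have h1 : (3 : Int) < streak + 1 := by omega
      rw [cn_E_ge streak hst]
      simp only [movesL, List.filterMap_cons, List.filterMap_nil, List.filter_cons,
        List.filter_nil, gB, hoE]
      simp [h1]
      split_ifs <;> simp_all
  · by_cases hst : streak < 3
    · have h1 : ¬ ((3 : Int) < streak + 1) := by omega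
      rw [cn_S_lt streak hst]
      simp only [movesL, List.filterMap_cons, List.filterMap_nil, List.filter_cons,
        List.filter_nil, gB, hoS]
      simp [h1]
      split_ifs <;> simp_all
    · have h1 : (3 : Int) < streak + 1 := by omega
      rw [cn_S_ge streak hst]
      simp only [movesL, List.filterMap_cons, List.filterMap_nil, List.filter_cons,
        List.filter_nil, gB, hoS]
      simp [h1]
      split_ifs <;> simp_all
  · by_cases hst : streak < 3
    · have h1 : ¬ ((3 : Int) < streak + 1) := by omega
      rw [cn_W_lt streak hst]
      simp only [movesL, List.filterMap_cons, List.filterMap_nil, List.filter_cons,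
        List.filter_nil, gB, hoW]
      simp [h1]
      split_ifs <;> simp_all
    · have h1 : (3 : Int) < streak + 1 := by omega
      rw [cn_W_ge streak hst]
      simp only [movesL, List.filterMap_cons, List.filterMap_nil, List.filter_cons,
        List.filter_nil, gB, hoW]
      simp [h1]
      split_ifs <;> simp_all
  · by_cases hst : streak < 3
    · have h1 : ¬ ((3 : Int) < streak + 1) := by omega
      rw [cn_N_lt streak hst]
      simp only [movesL, List.filterMap_cons, List.filterMap_nil, List.filter_cons,
        List.filter_nil, gB, hoN]
      simp [h1]
      split_ifs <;> simp_all
    · have h1 : (3 : Int) < streak + 1 := by omega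
      rw [cn_N_ge streak hst]
      simp only [movesL, List.filterMap_cons, List.filterMap_nil, List.filter_cons,
        List.filter_nil, gB, hoN]
      simp [h1]
      split_ifs <;> simp_all

lemma compute_next_labels (label : String) (streak : Int)
    (hlab : label ∈ (["E", "S", "W", "N"] : List String)) :
    ∀ x ∈ compute_next (label, streak), x.1.1 ∈ (["E", "S", "W", "N"] : List String) := by
  fin_cases hlab
  · by_cases hst : streak < 3
    · rw [cn_E_lt streak hst]; intro x hx; fin_cases hx <;> simp
    · rw [cn_E_ge streak hst]; intro x hx; fin_cases hx <;> simp
  · by_cases hst : streak < 3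
    · rw [cn_S_lt streak hst]; intro x hx; fin_cases hx <;> simp
    · rw [cn_S_ge streak hst]; intro x hx; fin_cases hx <;> simp
  · by_cases hst : streak < 3
    · rw [cn_W_lt streak hst]; intro x hx; fin_cases hx <;> simp
    · rw [cn_W_ge streak hst]; intro x hx; fin_cases hx <;> simp
  · by_cases hst : streak < 3
    · rw [cn_N_lt streak hst]; intro x hx; fin_cases hx <;> simp
    · rw [cn_N_ge streak hst]; intro x hx; fin_cases hx <;> simp

lemma loop_eq (cm : List (List Int)) (mr mc : Int) :
    ∀ (fuel : Nat) (path : List PvEntry) (front : SHeap)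
      (vis : PySem.Set ((String × Int) × Int × Int)),
      (↑path : Multiset PvEntry) = hms front → hinv front →
      (∀ e ∈ hms front, e.2.1.1 ∈ (["E", "S", "W", "N"] : List String)) →
      loopA cm mr mc fuel path vis = loopB cm mr mc fuel front vis := by
  intro fuel
  induction fuel with
  | zero => intro path front vis _ _ _; rfl
  | succ n ih =>
    intro path front vis hcoe hinvh hlab
    cases front with
    | leaf =>
      have : path = [] := by
        have := hcoe
        simp [hms] at this
        simpa using this
      subst this
      rfl
    | node e l r =>
      obtain ⟨heat, ⟨label, streak⟩, rr, cc⟩ := e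
      have hmin : pymin path = some (heat, (label, streak), rr, cc) := pymin_eq_root hcoe hinvh
      have hmem : (heat, (label, streak), rr, cc) ∈ path := by
        rw [← Multiset.mem_coe, hcoe, hms]
        exact Multiset.mem_cons_self _ _
      have herase : (↑(path.erase (heat, (label, streak), rr, cc)) : Multiset PvEntry)
          = hms (hmeld l r) := by
        have hp : (↑path : Multiset PvEntry)
            = (heat, (label, streak), rr, cc) ::ₘ ↑(path.erase (heat, (label, streak), rr, cc)) := by
          simpa using Multiset.coe_eq_coe.mpr (List.perm_cons_erase hmem)
        rw [hcoe, hms] at hp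
        rw [hmeld_ms, ← Multiset.cons_inj_right (a := ((heat, (label, streak), rr, cc) : PvEntry))]
        exact hp.symm
      have hinv0 : hinv (hmeld l r) := hmeld_inv _ _ hinvh.2.1 hinvh.2.2
      have hlab0 : ∀ e ∈ hms (hmeld l r), e.2.1.1 ∈ (["E", "S", "W", "N"] : List String) := by
        intro x hx
        rw [hmeld_ms] at hx
        exact hlab x (by rw [hms]; exact Multiset.mem_cons_of_mem hx)
      simp only [loopA, loopB, hmin]
      by_cases hgoal : rr = mr - 1 ∧ cc = mc - 1
      · rw [if_pos hgoal, if_pos hgoal]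
      · rw [if_neg hgoal, if_neg hgoal]
        by_cases hvis : PySem.Set.contains vis ((label, streak), rr, cc) = true
        · rw [if_pos hvis, if_pos hvis]
          exact ih _ _ _ herase hinv0 hlab0
        · rw [if_neg hvis, if_neg hvis]
          rw [bodyB_eq cm mr mc heat label streak rr cc]
          obtain ⟨hmsB, hinvB⟩ := foldl_push_ms (gB cm mr mc heat label streak rr cc) movesL
            (hmeld l r) hinv0
          have hlabE : label ∈ (["E", "S", "W", "N"] : List String) := by
            simpa using hlab (heat, (label, streak), rr, cc) (by rw [hms]; exact Multiset.mem_cons_self _ _)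
          have hA : (compute_next (label, streak)).foldl (fun p nxt =>
              if 0 ≤ nxt.2.1 + rr ∧ nxt.2.1 + rr < mr ∧ 0 ≤ nxt.2.2 + cc ∧ nxt.2.2 + cc < mc then
                p ++ [(heat + cellD cm (nxt.2.1 + rr) (nxt.2.2 + cc), nxt.1, nxt.2.1 + rr, nxt.2.2 + cc)]
              else p) (path.erase (heat, (label, streak), rr, cc))
            = path.erase (heat, (label, streak), rr, cc) ++
              ((compute_next (label, streak)).filter (fun nxt =>
                decide (0 ≤ nxt.2.1 + rr ∧ nxt.2.1 + rr < mr ∧ 0 ≤ nxt.2.2 + cc ∧ nxt.2.2 + cc < mc))).map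
                (fun nxt => (heat + cellD cm (nxt.2.1 + rr) (nxt.2.2 + cc), nxt.1, nxt.2.1 + rr, nxt.2.2 + cc)) :=
            PySem.List.foldl_append_ite _ _ _ _
          apply ih
          · rw [hA, hmsB, ← succs_eq cm mr mc heat streak rr cc label hlabE, ← Multiset.coe_add,
              ← herase]
          · exact hinvB
          · intro x hx
            rw [hmsB] at hx
            rcases Multiset.mem_add.mp hx with hx' | hx'
            · exact hlab0 x hx'
            · rw [Multiset.mem_coe, ← succs_eq cm mr mc heat streak rr cc label hlabE] at hx'
              obtain ⟨nxt, hnxt, rfl⟩ := List.mem_map.mp hx'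
              exact compute_next_labels label streak hlabE nxt (List.mem_filter.mp hnxt).1

-- ===== VERDICT (by name: the statement is the Claim_ definition above) =====
theorem minimize_heat_loss_spec : Claim_equal_minimize_heat_loss := by
  intro cm _ _
  unfold Spec_minimize_heat_loss minimize_heat_loss minimize_heat_loss_alt
  exact loop_eq cm _ _ (pvFuel cm) _ _ _ (by simp [hms]) ⟨by simp [hms], trivial, trivial⟩
    (by intro e he; simp [hms] at he; subst he; simp)
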